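-- pv_equiv track=rewrite | github.com/ssongjj/studycodingtest | 프로그래머스/1/42862. 체육복/체육복.py | solution
-- ===== SOURCE A (Python) =====
-- def solution(n, lost, reserve):
--     answer = 0
--     y = set(lost) & set(reserve) # 도난 당했지만 여분 옷이 있는 애들
--     losts = set(lost) - y
--     reserves = set(reserve) - y
--
--     for r in sorted(reserves):
--         if r - 1 in losts:   #앞 번호의 학생이 하나를 빌려야 한다면
--             losts.remove(r-1)
--         elif r + 1 in losts:  #뒷 번호의 학생이 하나를 빌려야 한다면
--         	losts.remove(r+1)
--
--     answer = n - len(losts)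
--     return answer
-- ===== SOURCE B (Python) =====
-- def solution(n, lost, reserve):
--     both = set(lost) & set(reserve)
--     L = sorted(set(lost) - both)
--     R = sorted(set(reserve) - both)
--     i = j = 0
--     unmatched = 0
--     while i < len(L):
--         if j >= len(R) or L[i] < R[j] - 1:
--             unmatched += 1
--             i += 1
--         elif L[i] > R[j] + 1:
--             j += 1
--         else:
--             i += 1
--             j += 1
--     return n - unmatched
-- ===== Notes on version B (the rewrite author's own statement) =====
-- stated objective: alternative
-- what changed: A repeatedly tests membership of r-1/r+1 in the lost-set and erases matches per reserve; B instead sorts both deduplicated disjoint lists once and counts unmatched lost students in a single two-pointer merge pass with no set mutation.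
import Mathlib
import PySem

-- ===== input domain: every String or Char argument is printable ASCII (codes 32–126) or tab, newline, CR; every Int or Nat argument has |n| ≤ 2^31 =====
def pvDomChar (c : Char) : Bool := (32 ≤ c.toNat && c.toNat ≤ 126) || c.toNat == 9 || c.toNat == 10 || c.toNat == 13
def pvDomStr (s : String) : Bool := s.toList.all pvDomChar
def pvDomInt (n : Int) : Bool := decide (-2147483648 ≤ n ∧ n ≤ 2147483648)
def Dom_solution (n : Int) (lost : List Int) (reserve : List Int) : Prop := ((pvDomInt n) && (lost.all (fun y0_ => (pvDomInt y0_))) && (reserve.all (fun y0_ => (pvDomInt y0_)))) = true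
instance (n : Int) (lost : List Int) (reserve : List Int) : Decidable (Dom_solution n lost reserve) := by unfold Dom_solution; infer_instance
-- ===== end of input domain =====

-- B replaces A's per-reserve set-membership/removal loop by one two-pointer merge of the
-- two sorted disjoint lists (objective: alternative; same sorting cost, no repeated erases).

-- ===== PORT A =====
-- loop body of A's 'for r in sorted(reserves)' (set.remove under the membership guard = List.erase)
def aStep (s : List Int) (r : Int) : List Int :=
  if (r - 1) ∈ s then s.erase (r - 1)
  else if (r + 1) ∈ s then s.erase (r + 1)
  else s

def solution (n : Int) (lost : List Int) (reserve : List Int) : Int :=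
  let y := PySem.Set.inter (PySem.Set.ofList lost) (PySem.Set.ofList reserve)
  let losts := PySem.Set.diff (PySem.Set.ofList lost) y
  let reserves := PySem.Set.diff (PySem.Set.ofList reserve) y
  let final := (PySem.List.sorted reserves (fun x => x) false).foldl aStep losts
  n - (final.length : Int)

-- ===== PORT B =====
-- B's while-loop over indices i, j, transcribed as the recursion over the two suffixes
def tp : List Int → List Int → Int
  | [], _ => 0
  | _ :: L, [] => 1 + tp L []
  | l :: L, r :: R =>
    if l < r - 1 then 1 + tp L (r :: R)
    else if l > r + 1 then tp (l :: L) R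
    else tp L R
termination_by L R => L.length + R.length

def solution_alt (n : Int) (lost : List Int) (reserve : List Int) : Int :=
  let both := PySem.Set.inter (PySem.Set.ofList lost) (PySem.Set.ofList reserve)
  let L := PySem.List.sorted (PySem.Set.diff (PySem.Set.ofList lost) both) (fun x => x) false
  let R := PySem.List.sorted (PySem.Set.diff (PySem.Set.ofList reserve) both) (fun x => x) false
  n - tp L R

-- ===== PRECONDITION & SPEC =====
def Spec_solution (n : Int) (lost : List Int) (reserve : List Int) (out : Int) : Prop := out = solution_alt n lost reserve
instance (n : Int) (lost : List Int) (reserve : List Int) (out : Int) : Decidable (Spec_solution n lost reserve out) := by unfold Spec_solution; infer_instance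

-- ===== CLAIM (what is proved, stated in full; the proofs are below) =====
def Claim_equal_solution : Prop := ∀ (n : Int) (lost : List Int) (reserve : List Int), Dom_solution n lost reserve → Spec_solution n lost reserve (solution n lost reserve)

-- ===== LEMMAS AND PROOFS =====

-- A's loop result (up to permutation) does not depend on the order of the state set
lemma foldl_aStep_perm (R : List Int) : ∀ s s' : List Int, s.Perm s' →
    (R.foldl aStep s).Perm (R.foldl aStep s') := by
  induction R with
  | nil => intro s s' h; simpa using h
  | cons r R ih =>
    intro s s' h
    apply ih
    unfold aStep
    by_cases m1 : (r - 1) ∈ s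
    · rw [if_pos m1, if_pos (h.mem_iff.mp m1)]; exact h.erase _
    · rw [if_neg m1, if_neg (fun c => m1 (h.mem_iff.mpr c))]
      by_cases m2 : (r + 1) ∈ s
      · rw [if_pos m2, if_pos (h.mem_iff.mp m2)]; exact h.erase _
      · rw [if_neg m2, if_neg (fun c => m2 (h.mem_iff.mpr c))]; exact h

lemma foldl_aStep_nil (R : List Int) : R.foldl aStep [] = [] := by
  induction R with
  | nil => rfl
  | cons r R ih => simpa [aStep] using ih

-- an element smaller than every q-1 for q in R is never touched by A's loop
lemma foldl_aStep_cons_small (R : List Int) : ∀ (x : Int) (L : List Int),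
    (∀ q ∈ R, x < q - 1) → R.foldl aStep (x :: L) = x :: R.foldl aStep L := by
  induction R with
  | nil => intro x L _; rfl
  | cons r R ih =>
    intro x L h
    have hr := h r (by simp)
    have hstep : aStep (x :: L) r = x :: aStep L r := by
      have h1 : (r - 1 = x) = False := eq_false (by omega)
      have h2 : (r + 1 = x) = False := eq_false (by omega)
      simp only [aStep, List.mem_cons, h1, h2, false_or]
      split_ifs with m1 m2
      · exact List.erase_cons_tail (by simp; omega)
      · exact List.erase_cons_tail (by simp; omega)
      · rfl
    simp only [List.foldl_cons]
    rw [hstep]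
    exact ih x (aStep L r) (fun q hq => h q (by simp [hq]))

lemma tp_nil (L : List Int) : tp L [] = L.length := by
  induction L with
  | nil => simp [tp]
  | cons x L ih => simp [tp, ih]; omega

-- the heart: on sorted, disjoint lists, A's loop leaves exactly tp-many students unmatched
lemma main_lemma (R : List Int) : ∀ L : List Int,
    L.Pairwise (· < ·) → R.Pairwise (· < ·) → (∀ a ∈ L, a ∉ R) →
    ((R.foldl aStep L).length : Int) = tp L R := by
  induction R with
  | nil => intro L _ _ _; simp [tp_nil]
  | cons r R ihR =>
    intro L
    induction L with
    | nil =>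
      intro _ _ _
      rw [foldl_aStep_nil]
      simp [tp]
    | cons y Y ihL =>
      intro hL hR hdisj
      have hYlt : ∀ z ∈ Y, y < z := (List.pairwise_cons.mp hL).1
      have hY : Y.Pairwise (· < ·) := (List.pairwise_cons.mp hL).2
      have hRlt : ∀ q ∈ R, r < q := (List.pairwise_cons.mp hR).1
      have hR' : R.Pairwise (· < ·) := (List.pairwise_cons.mp hR).2
      have hyne : y ≠ r := by
        intro h; exact hdisj y (by simp) (by simp [h])
      by_cases hlt : y < r - 1
      · -- skip y on both sides
        have hsmall : ∀ q ∈ r :: R, y < q - 1 := by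
          intro q hq; rcases List.mem_cons.mp hq with h | h
          · omega
          · have := hRlt q h; omega
        rw [foldl_aStep_cons_small _ y Y hsmall]
        have htp : tp (y :: Y) (r :: R) = 1 + tp Y (r :: R) := by
          simp only [tp]; rw [if_pos hlt]
        rw [htp, ← ihL hY hR (fun a ha => hdisj a (by simp [ha]))]
        simp only [List.length_cons]
        push_cast; ring
      · by_cases hgt : y > r + 1
        · -- r matches nobody: every element of L is < r-1 (none) or > r+1
          have hstep : aStep (y :: Y) r = y :: Y := by
            unfold aStep
            have h1 : (r - 1) ∉ y :: Y := by
              intro h; rcases List.mem_cons.mp h with h | h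
              · omega
              · have := hYlt _ h; omega
            have h2 : (r + 1) ∉ y :: Y := by
              intro h; rcases List.mem_cons.mp h with h | h
              · omega
              · have := hYlt _ h; omega
            simp [h1, h2]
          have htp : tp (y :: Y) (r :: R) = tp (y :: Y) R := by
            simp only [tp]; rw [if_neg (by omega), if_pos (by omega)]
          rw [List.foldl_cons, hstep, htp]
          exact ihR (y :: Y) hL hR'
            (fun a ha => fun hmem => hdisj a ha (by simp [hmem]))
        · -- match: y = r - 1 or y = r + 1; A erases y, B consumes both heads
          have hy : y = r - 1 ∨ y = r + 1 := by omega
          have hstep : aStep (y :: Y) r = Y := by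
            unfold aStep
            rcases hy with h | h
            · simp [← h]
            · have h1 : (r - 1) ∉ y :: Y := by
                intro hm; rcases List.mem_cons.mp hm with hm | hm
                · omega
                · have := hYlt _ hm; omega
              simp [h1, ← h]
          have htp : tp (y :: Y) (r :: R) = tp Y R := by
            simp only [tp]; rw [if_neg (by omega), if_neg (by omega)]
          rw [List.foldl_cons, hstep, htp]
          exact ihR Y hY hR'
            (fun a ha hm => hdisj a (by simp [ha]) (by simp [hm]))

lemma disj_diff (lost reserve : List Int) :
    ∀ a ∈ PySem.Set.diff (PySem.Set.ofList lost)
        (PySem.Set.inter (PySem.Set.ofList lost) (PySem.Set.ofList reserve)),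
      a ∉ PySem.Set.diff (PySem.Set.ofList reserve)
        (PySem.Set.inter (PySem.Set.ofList lost) (PySem.Set.ofList reserve)) := by
  intro a ha hb
  rw [PySem.Set.mem_diff] at ha hb
  exact ha.2 (by rw [PySem.Set.mem_inter]; exact ⟨ha.1, hb.1⟩)

lemma sorted_diff_pairwise (xs : List Int) (t : List Int) :
    (PySem.List.sorted (PySem.Set.diff (PySem.Set.ofList xs) t) (fun x => x) false).Pairwise (· < ·) := by
  have hnd : (PySem.List.sorted (PySem.Set.diff (PySem.Set.ofList xs) t) (fun x => x) false).Nodup :=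
    (PySem.List.sorted_perm _ _ _).nodup_iff.mpr
      (PySem.Set.nodup_diff (PySem.Set.ofList xs) t (PySem.Set.nodup_ofList xs))
  have hle := PySem.List.sorted_pairwise (PySem.Set.diff (PySem.Set.ofList xs) t) (fun x => x)
  exact (hle.and hnd).imp (fun h => lt_of_le_of_ne h.1 h.2)

-- ===== VERDICT (by name: the statement is the Claim_ definition above) =====
theorem solution_spec : Claim_equal_solution := by
  intro n lost reserve _
  simp only [Spec_solution, solution, solution_alt]
  congr 1
  set y := PySem.Set.inter (PySem.Set.ofList lost) (PySem.Set.ofList reserve) with hy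
  set losts := PySem.Set.diff (PySem.Set.ofList lost) y with hlosts
  set L := PySem.List.sorted losts (fun x => x) false with hL
  set R := PySem.List.sorted (PySem.Set.diff (PySem.Set.ofList reserve) y) (fun x => x) false with hR
  have hperm : (R.foldl aStep losts).Perm (R.foldl aStep L) :=
    foldl_aStep_perm R losts L (PySem.List.sorted_perm losts (fun x => x) false).symm
  rw [hperm.length_eq]
  apply main_lemma R L (sorted_diff_pairwise lost y) (sorted_diff_pairwise reserve y)
  intro a ha hb
  rw [hL, PySem.List.mem_sorted] at ha
  rw [hR, PySem.List.mem_sorted] at hb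
  exact disj_diff lost reserve a ha hb
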